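-- pv_equiv track=rewrite | github.com/edeyneka/Phage_genes_prediction..github.io | Evaluation_experiment/Result.py | index_transition
-- ===== SOURCE A (Python) =====
-- def index_transition(seq, stop):
--     i=0
--     count = 0
--     while count < stop:
--         if seq[i]!='-':
--             count+=1
--         i+=1
--     return i
-- ===== SOURCE B (Python) =====
-- def index_transition(seq, stop):
--     if stop <= 0:
--         return 0
--     idx = [i for i, c in enumerate(seq) if c != '-']
--     return idx[stop - 1] + 1
-- ===== Notes on version B (the rewrite author's own statement) =====
-- stated objective: simpler
-- what changed: Replaces the counting while-loop (manual index and count accumulators) with a one-pass comprehension collecting the indices of non-gap characters followed by a single list indexing idx[stop-1]+1.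
import Mathlib
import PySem

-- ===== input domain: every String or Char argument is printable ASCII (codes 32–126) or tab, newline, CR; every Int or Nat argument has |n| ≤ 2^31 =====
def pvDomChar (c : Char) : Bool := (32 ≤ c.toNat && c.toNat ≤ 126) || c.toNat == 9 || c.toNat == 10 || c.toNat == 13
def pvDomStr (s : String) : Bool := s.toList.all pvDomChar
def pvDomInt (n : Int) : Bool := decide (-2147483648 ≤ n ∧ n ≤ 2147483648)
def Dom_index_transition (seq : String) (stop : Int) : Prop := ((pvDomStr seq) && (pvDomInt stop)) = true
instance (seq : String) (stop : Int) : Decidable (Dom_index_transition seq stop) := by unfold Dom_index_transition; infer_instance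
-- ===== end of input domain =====

-- B replaces A's counting while-loop by collecting the indices of non-gap characters in one
-- pass and indexing that list once (simpler decomposition; same cost).


-- ===== PORT A =====
-- while count < stop: if seq[i] != '-': count += 1; i += 1.  Consuming the character list
-- tracks seq[i]; the [] branch is Python's IndexError (excluded by Pre_), value arbitrary.
def pvLoopA (stop : Int) (l : List Char) (i count : Int) : Int :=
  if count < stop then
    match l with
    | [] => i          -- Python raises IndexError here; outside Pre_
    | c :: r => pvLoopA stop r (i + 1) (if c ≠ '-' then count + 1 else count)
  else i

def index_transition (seq : String) (stop : Int) : Int :=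
  pvLoopA stop seq.toList 0 0

-- ===== PORT B =====
def index_transition_alt (seq : String) (stop : Int) : Int :=
  if stop ≤ 0 then 0
  else
    match PySem.List.pyGet?
        (((PySem.List.enumerate seq.toList 0).filter (fun p => p.2 != '-')).map (fun p => p.1))
        (stop - 1) with
    | some j => j + 1
    | none => 0        -- Python raises IndexError here; outside Pre_

-- ===== PRECONDITION & SPEC =====
-- Pre_ excludes exactly the inputs where Python A raises IndexError: a positive stop larger
-- than the number of non-gap characters of seq.
def Pre_index_transition (seq : String) (stop : Int) : Prop :=
  stop ≤ 0 ∨ stop ≤ ((seq.toList.filter (fun c => c != '-')).length : Int)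
instance (seq : String) (stop : Int) : Decidable (Pre_index_transition seq stop) := by unfold Pre_index_transition; infer_instance
def pvWitness_index_transition : String × Int := ("a-b", 2)

def Spec_index_transition (seq : String) (stop : Int) (out : Int) : Prop := out = index_transition_alt seq stop
instance (seq : String) (stop : Int) (out : Int) : Decidable (Spec_index_transition seq stop out) := by unfold Spec_index_transition; infer_instance

-- ===== CLAIM (what is proved, stated in full; the proofs are below) =====
def Claim_equal_index_transition : Prop := ∀ (seq : String) (stop : Int), Dom_index_transition seq stop → Pre_index_transition seq stop → Spec_index_transition seq stop (index_transition seq stop)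

-- ===== LEMMAS AND PROOFS =====

-- B's index list with an arbitrary enumerate start, for the induction.
def pvIdx (l : List Char) (s : Int) : List Int :=
  ((PySem.List.enumerate l s).filter (fun p => p.2 != '-')).map (fun p => p.1)

theorem pvIdx_cons (c : Char) (r : List Char) (s : Int) :
    pvIdx (c :: r) s = if c ≠ '-' then s :: pvIdx r (s + 1) else pvIdx r (s + 1) := by
  by_cases h : c = '-' <;> simp [pvIdx, PySem.List.enumerate_cons, h]

-- the count accumulator can be folded into stop
theorem pvLoopA_shift (l : List Char) : ∀ (stop i count : Int),
    pvLoopA stop l i count = pvLoopA (stop - count) l i 0 := by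
  induction l with
  | nil =>
    intro stop i count
    unfold pvLoopA
    by_cases h : count < stop
    · rw [if_pos h, if_pos (show (0:Int) < stop - count by omega)]
    · rw [if_neg h, if_neg (show ¬ (0:Int) < stop - count by omega)]
  | cons c r ih =>
    intro stop i count
    unfold pvLoopA
    by_cases hlt : count < stop
    · rw [if_pos hlt, if_pos (show (0:Int) < stop - count by omega)]
      by_cases hc : c = '-'
      · simp only [hc, ne_eq, not_true_eq_false, if_false]
        rw [ih stop (i+1) count, ih (stop - count) (i+1) 0]
      · simp only [ne_eq, hc, not_false_eq_true, if_true]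
        rw [ih stop (i+1) (count+1), ih (stop - count) (i+1) (0+1)]
        congr 1
        omega
    · rw [if_neg hlt, if_neg (show ¬ (0:Int) < stop - count by omega)]

-- main invariant: with 1 ≤ stop ≤ #non-gaps, the loop from offset s computes idx[stop-1]+1
theorem pvMain (l : List Char) : ∀ (stop s : Int), 0 < stop →
    stop ≤ ((l.filter (fun c => c != '-')).length : Int) →
    pvLoopA stop l s 0 =
      (match PySem.List.pyGet? (pvIdx l s) (stop - 1) with
       | some j => j + 1
       | none => 0) := by
  induction l with
  | nil =>
    intro stop s h1 h2
    simp at h2; omega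
  | cons c r ih =>
    intro stop s h1 h2
    unfold pvLoopA
    rw [if_pos (by omega : (0:Int) < stop)]
    by_cases hc : c = '-'
    · simp only [hc, ne_eq, not_true_eq_false, if_false]
      rw [pvIdx_cons]
      simp only [ne_eq, not_true_eq_false, if_false]
      exact ih stop (s+1) h1 (by simpa [hc] using h2)
    · simp only [ne_eq, hc, not_false_eq_true, if_true]
      rw [pvLoopA_shift, pvIdx_cons]
      simp only [ne_eq, hc, not_false_eq_true, if_true]
      have e01 : stop - (0 + 1) = stop - 1 := by ring
      rw [e01]
      by_cases h1' : stop = 1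
      · subst h1'
        unfold pvLoopA
        rw [if_neg (show ¬ (0:Int) < 1 - 1 by omega)]
        simp [PySem.List.pyGet?, PySem.List.pyIdx?]
      · have hpos : (0:Int) < stop - 1 := by omega
        have hfl : stop - 1 ≤ ((r.filter (fun c => c != '-')).length : Int) := by
          have hlen : (((c :: r).filter (fun c => c != '-')).length : Int)
              = (r.filter (fun c => c != '-')).length + 1 := by
            simp [hc]
          omega
        rw [ih (stop - 1) (s + 1) hpos hfl]
        have hcast : stop - 1 = ((stop - 2).toNat : Int) + 1 := by omega
        have hcast2 : stop - 1 - 1 = ((stop - 2).toNat : Int) := by omega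
        rw [hcast, PySem.List.pyGet?_cons_succ, ← hcast2]
        have e2 : stop - 1 - 1 + 1 - 1 = stop - 1 - 1 := by ring
        rw [e2]

-- ===== VERDICT (by name: the statement is the Claim_ definition above) =====
theorem index_transition_spec : Claim_equal_index_transition := by
  intro seq stop _ hpre
  unfold Spec_index_transition index_transition index_transition_alt
  by_cases h0 : stop ≤ 0
  · rw [if_pos h0]
    unfold pvLoopA
    rw [if_neg (by omega : ¬ (0:Int) < stop)]
  · rw [if_neg h0]
    have hle : stop ≤ ((seq.toList.filter (fun c => c != '-')).length : Int) := by
      rcases hpre with h | h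
      · omega
      · exact h
    exact pvMain seq.toList stop 0 (by omega) hle
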